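-- pv_equiv track=rewrite | github.com/AjCodez/Leetcode | 1770-maximum-score-from-performing-multiplication-operations/1770-maximum-score-from-performing-multiplication-operations.py | maximumScore
-- ===== SOURCE A (Python) =====
-- from typing import List
--
-- def maximumScore(nums: List[int], multipliers: List[int]) -> int:
--
--     n=len(nums)
--     m=len(multipliers)
--
--     dp=[[0] * (m+1) for i in range(m+1)]
--
--     for i in range(m-1, -1, -1):
--         for j in range(m-1, -1, -1):
--
--             r=n-(j-i)-1
--
--             if r<0 or r>=n:
--                 break
--
--             s=nums[i]*multipliers[j]+dp[i+1][j+1]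
--             e=nums[r]*multipliers[j]+dp[i][j+1]
--             dp[i][j]=max(s, e)
--
--     return dp[0][0]
-- ===== SOURCE B (Python) =====
-- from typing import List
--
-- def maximumScore(nums: List[int], multipliers: List[int]) -> int:
--     # Top-down memoized evaluation of states (op, left), driven by an explicit
--     # DFS stack (depth-safe) instead of A's bottom-up 2-D table sweep with its
--     # break-based row trimming; only states reachable from (0, 0) are computed.
--     n, m = len(nums), len(multipliers)
--     memo = {}
--     stack = [(0, 0)]
--     while stack:
--         op, left = stack[-1]
--         if (op, left) in memo:
--             stack.pop()
--         elif op == m: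
--             memo[(op, left)] = 0
--             stack.pop()
--         else:
--             a = memo.get((op + 1, left + 1))
--             b = memo.get((op + 1, left))
--             if a is not None and b is not None:
--                 right = n - 1 - (op - left)
--                 memo[(op, left)] = max(multipliers[op] * nums[left] + a,
--                                        multipliers[op] * nums[right] + b)
--                 stack.pop()
--             else:
--                 if a is None:
--                     stack.append((op + 1, left + 1))
--                 if b is None:
--                     stack.append((op + 1, left))
--     return memo[(0, 0)]
-- ===== Notes on version B (the rewrite author's own statement) =====
-- stated objective: alternative
-- what changed: Replaces A's bottom-up 2-D table sweep (with break-based row trimming) by top-down memoized evaluation of the recurrence: a dict memo filled lazily by an explicit DFS worklist stack starting from state (0,0), computing only reachable states.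
-- outside the precondition, e.g. on maximumScore([], [1]): A returns 0, B raises IndexError
import Mathlib
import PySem

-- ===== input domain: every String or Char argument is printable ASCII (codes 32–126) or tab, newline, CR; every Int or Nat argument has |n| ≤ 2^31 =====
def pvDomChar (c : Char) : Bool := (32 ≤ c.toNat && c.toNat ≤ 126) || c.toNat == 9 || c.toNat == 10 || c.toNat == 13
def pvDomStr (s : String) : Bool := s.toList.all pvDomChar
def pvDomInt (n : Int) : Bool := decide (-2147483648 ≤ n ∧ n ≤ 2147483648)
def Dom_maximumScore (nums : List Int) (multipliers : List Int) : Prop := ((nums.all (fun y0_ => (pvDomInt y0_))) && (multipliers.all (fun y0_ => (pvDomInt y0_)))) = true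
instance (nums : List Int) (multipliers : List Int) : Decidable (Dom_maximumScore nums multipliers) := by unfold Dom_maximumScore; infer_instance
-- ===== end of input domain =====

-- B replaces A's bottom-up 2-D table sweep by top-down memoized evaluation of the
-- recurrence: an explicit DFS worklist stack from state (0,0) filling a dict memo lazily.

-- shared indexing primitive: Python's xs[k] (in range on all admitted reads)
def pvGetL (xs : List Int) (i : Int) : Int := (PySem.List.pyGet? xs i).getD 0

-- ===== PORT A =====
def pvGet2 (dp : List (List Int)) (i j : Nat) : Int := (dp.getD i []).getD j 0
def pvSet2 (dp : List (List Int)) (i j : Nat) (v : Int) : List (List Int) :=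
  dp.set i ((dp.getD i []).set j v)

-- inner loop: for j in range(m-1,-1,-1) with the break; jc = number of js left, j = jc-1
def aInner (nums mult : List Int) (n : Int) (i : Nat) : List (List Int) → Nat → List (List Int)
  | dp, 0 => dp
  | dp, j+1 =>
    let r : Int := n - ((j : Int) - (i : Int)) - 1
    if r < 0 ∨ n ≤ r then dp
    else
      let s := pvGetL nums i * pvGetL mult j + pvGet2 dp (i+1) (j+1)
      let e := pvGetL nums r * pvGetL mult j + pvGet2 dp i (j+1)
      aInner nums mult n i (pvSet2 dp i j (max s e)) j

-- outer loop: for i in range(m-1,-1,-1); ic = number of is left, i = ic-1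
def aOuter (nums mult : List Int) (n : Int) (m : Nat) : List (List Int) → Nat → List (List Int)
  | dp, 0 => dp
  | dp, i+1 => aOuter nums mult n m (aInner nums mult n i dp m) i

def maximumScore (nums : List Int) (multipliers : List Int) : Int :=
  let n : Int := nums.length
  let m : Nat := multipliers.length
  let dp := List.replicate (m+1) (List.replicate (m+1) (0 : Int))
  pvGet2 (aOuter nums multipliers n m dp m) 0 0

-- ===== PORT B =====
-- the while loop over the DFS stack (head of the list = top of the stack);
-- fuel only makes the loop total in Lean — 2^(m+2) is proved sufficient below
def bLoop (nums mult : List Int) (n : Int) (m : Nat) :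
    Nat → List (Nat × Nat) → PySem.Dict (Nat × Nat) Int → PySem.Dict (Nat × Nat) Int
  | 0, _, memo => memo
  | _+1, [], memo => memo
  | fuel+1, (op, left) :: rest, memo =>
    if (memo.get? (op, left)).isSome then
      bLoop nums mult n m fuel rest memo
    else if op = m then
      bLoop nums mult n m fuel rest (memo.insert (op, left) 0)
    else
      match memo.get? (op+1, left+1), memo.get? (op+1, left) with
      | some a, some b =>
        let right : Int := n - 1 - ((op : Int) - (left : Int))
        bLoop nums mult n m fuel rest
          (memo.insert (op, left)
            (max (pvGetL mult op * pvGetL nums left + a)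
                 (pvGetL mult op * pvGetL nums right + b)))
      | some _, none => bLoop nums mult n m fuel ((op+1, left) :: (op, left) :: rest) memo
      | none, some _ => bLoop nums mult n m fuel ((op+1, left+1) :: (op, left) :: rest) memo
      | none, none =>
        bLoop nums mult n m fuel ((op+1, left) :: (op+1, left+1) :: (op, left) :: rest) memo

def maximumScore_alt (nums : List Int) (multipliers : List Int) : Int :=
  let n : Int := nums.length
  let m : Nat := multipliers.length
  let memo := bLoop nums multipliers n m (2 ^ (m + 2)) [(0, 0)] PySem.Dict.empty
  memo.getD (0, 0) 0

-- ===== PRECONDITION & SPEC =====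
-- Pre_ requires len(multipliers) ≤ len(nums), the problem's constraint: beyond it A raises
-- IndexError whenever nums is nonempty, and when nums is empty A's zero-initialised dp makes
-- it return an accidental 0 while B's indexing naturally raises.
def Pre_maximumScore (nums : List Int) (multipliers : List Int) : Prop :=
  multipliers.length ≤ nums.length
instance (nums : List Int) (multipliers : List Int) : Decidable (Pre_maximumScore nums multipliers) := by
  unfold Pre_maximumScore; infer_instance

def pvWitness_maximumScore : List Int × List Int := ([1, 2, 3], [4, -2])

def Spec_maximumScore (nums : List Int) (multipliers : List Int) (out : Int) : Prop := out = maximumScore_alt nums multipliers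
instance (nums : List Int) (multipliers : List Int) (out : Int) : Decidable (Spec_maximumScore nums multipliers out) := by unfold Spec_maximumScore; infer_instance

-- ===== CLAIM (what is proved, stated in full; the proofs are below) =====
def Claim_equal_maximumScore : Prop := ∀ (nums : List Int) (multipliers : List Int), Dom_maximumScore nums multipliers → Pre_maximumScore nums multipliers → Spec_maximumScore nums multipliers (maximumScore nums multipliers)

-- ===== LEMMAS AND PROOFS =====

-- the common value: G f op left = value of state (op,left) with fuel f = m - op
def G (nums mult : List Int) : Nat → Nat → Nat → Int
  | 0, _, _ => 0
  | f+1, op, left =>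
    let r : Int := (nums.length : Int) - 1 - ((op : Int) - (left : Int))
    max (pvGetL mult op * pvGetL nums left + G nums mult f (op+1) (left+1))
        (pvGetL mult op * pvGetL nums r + G nums mult f (op+1) left)

-- list getD/set helpers
theorem getD_replicate_zero (n k : Nat) : (List.replicate n (0 : Int)).getD k 0 = 0 := by
  rcases h : (List.replicate n (0 : Int))[k]? with _ | v
  · simp [List.getD, h]
  · have hv : v = 0 := List.eq_of_mem_replicate (List.mem_of_getElem? h)
    simp [List.getD, h, hv]

-- pvSet2 facts
theorem set2_row_ne (dp : List (List Int)) (i j k : Nat) (v : Int) (h : k ≠ i) :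
    ((pvSet2 dp i j v).getD k []) = dp.getD k [] := by
  simp [pvSet2, List.getD, List.getElem?_set_ne (by omega : i ≠ k)]

theorem set2_length (dp : List (List Int)) (i j : Nat) (v : Int) :
    (pvSet2 dp i j v).length = dp.length := by simp [pvSet2]

theorem set2_rowlen (dp : List (List Int)) (i j k : Nat) (v : Int) :
    ((pvSet2 dp i j v).getD k []).length = (dp.getD k []).length := by
  by_cases h : k = i
  · subst h
    by_cases hk : k < dp.length
    · simp [pvSet2, List.getD, List.getElem?_set_self, hk]
    · simp [pvSet2, List.getD, List.set_eq_of_length_le (by omega : dp.length ≤ k)]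
  · rw [set2_row_ne dp i j k v h]

theorem get2_set2_self (dp : List (List Int)) (i j : Nat) (v : Int)
    (hi : i < dp.length) (hj : j < (dp.getD i []).length) :
    pvGet2 (pvSet2 dp i j v) i j = v := by
  simp [pvGet2, pvSet2, List.getD, List.getElem?_set_self, hi]
  have : (dp.getD i []) = dp[i] := by simp [List.getD, List.getElem?_eq_getElem hi]
  rw [List.getElem?_set_self (by rw [← this]; exact hj)]
  simp

theorem get2_set2_col_ne (dp : List (List Int)) (i j j' : Nat) (v : Int) (h : j' ≠ j) :
    pvGet2 (pvSet2 dp i j v) i j' = pvGet2 dp i j' := by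
  by_cases hi : i < dp.length
  · simp [pvGet2, pvSet2, List.getD, List.getElem?_set_self, hi,
      List.getElem?_set_ne (by omega : j ≠ j')]
  · simp [pvGet2, pvSet2, List.set_eq_of_length_le (by omega : dp.length ≤ i)]

theorem get2_of_row_eq (dp dp' : List (List Int)) (i j : Nat)
    (h : dp'.getD i [] = dp.getD i []) : pvGet2 dp' i j = pvGet2 dp i j := by
  unfold pvGet2
  rw [h]

-- aInner preserves everything off row i
theorem aInner_row_ne (nums mult : List Int) (n : Int) (i : Nat) (dp : List (List Int))
    (jc : Nat) (k : Nat) (h : k ≠ i) :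
    ((aInner nums mult n i dp jc).getD k []) = dp.getD k [] := by
  induction jc generalizing dp with
  | zero => rfl
  | succ j ih =>
    simp only [aInner]
    split
    · rfl
    · rw [ih, set2_row_ne _ _ _ _ _ h]

theorem aInner_length (nums mult : List Int) (n : Int) (i : Nat) (dp : List (List Int)) (jc : Nat) :
    (aInner nums mult n i dp jc).length = dp.length := by
  induction jc generalizing dp with
  | zero => rfl
  | succ j ih =>
    simp only [aInner]
    split
    · rfl
    · rw [ih, set2_length]

theorem aInner_rowlen (nums mult : List Int) (n : Int) (i : Nat) (dp : List (List Int))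
    (jc k : Nat) :
    ((aInner nums mult n i dp jc).getD k []).length = ((dp.getD k []).length) := by
  induction jc generalizing dp with
  | zero => rfl
  | succ j ih =>
    simp only [aInner]
    split
    · rfl
    · rw [ih, set2_rowlen]

-- main inner-loop invariant for A
theorem aInner_spec (nums mult : List Int) (n : Int) (hn : n = (nums.length : Int))
    (hm : mult.length ≤ nums.length) (i : Nat) (hi : i < mult.length)
    (dp : List (List Int)) (hdplen : dp.length = mult.length + 1)
    (hrowlen : ∀ k ≤ mult.length, (dp.getD k []).length = mult.length + 1)
    (jc : Nat) (hjc : jc ≤ mult.length)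
    (hnext : ∀ j, i + 1 ≤ j → j ≤ mult.length →
      pvGet2 dp (i+1) j = G nums mult (mult.length - j) j (i+1))
    (hdone : ∀ j, jc ≤ j → j ≤ mult.length →
      pvGet2 dp i j = G nums mult (mult.length - j) j i) :
    ∀ j, j ≤ mult.length → (i ≤ j ∨ jc ≤ j) →
      pvGet2 (aInner nums mult n i dp jc) i j = G nums mult (mult.length - j) j i := by
  induction jc generalizing dp with
  | zero =>
    intro j hj _
    exact hdone j (Nat.zero_le _) hj
  | succ j0 ih =>
    simp only [aInner]
    by_cases hij : i ≤ j0
    · -- no break: 0 ≤ r < n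
      have hbr : ¬ ((n - ((j0 : Int) - (i : Int)) - 1) < 0 ∨ n ≤ n - ((j0 : Int) - (i : Int)) - 1) := by
        have h1 : (j0 : Int) - (i : Int) ≤ (nums.length : Int) - 1 := by
          have : (j0 : Int) < (mult.length : Int) := by exact_mod_cast hjc
          have : (mult.length : Int) ≤ (nums.length : Int) := by exact_mod_cast hm
          omega
        have h2 : (0 : Int) ≤ (j0 : Int) - (i : Int) := by
          have : (i : Int) ≤ (j0 : Int) := by exact_mod_cast hij
          omega
        omega
      rw [if_neg hbr]
      -- value written is G (m - j0) j0 i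
      have hj0m : j0 < mult.length := hjc
      have hsval : pvGet2 dp (i+1) (j0+1) = G nums mult (mult.length - (j0+1)) (j0+1) (i+1) :=
        hnext (j0+1) (by omega) (by omega)
      have heval : pvGet2 dp i (j0+1) = G nums mult (mult.length - (j0+1)) (j0+1) i :=
        hdone (j0+1) (by omega) (by omega)
      have hfuel : mult.length - j0 = (mult.length - (j0+1)) + 1 := by omega
      have hr : n - ((j0 : Int) - (i : Int)) - 1 = (nums.length : Int) - 1 - ((j0 : Int) - (i : Int)) := by
        rw [hn]; ring
      have hv : max (pvGetL nums i * pvGetL mult j0 + pvGet2 dp (i+1) (j0+1))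
                    (pvGetL nums (n - ((j0 : Int) - (i : Int)) - 1) * pvGetL mult j0 + pvGet2 dp i (j0+1))
              = G nums mult (mult.length - j0) j0 i := by
        rw [hsval, heval, hfuel, hr]
        simp only [G]
        push_cast
        ring_nf
      set v := max (pvGetL nums i * pvGetL mult j0 + pvGet2 dp (i+1) (j0+1))
                   (pvGetL nums (n - ((j0 : Int) - (i : Int)) - 1) * pvGetL mult j0 + pvGet2 dp i (j0+1)) with hvdef
      set dp1 := pvSet2 dp i j0 v with hdp1
      have hdp1len : dp1.length = mult.length + 1 := by rw [hdp1, set2_length, hdplen]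
      have hdp1rowlen : ∀ k ≤ mult.length, (dp1.getD k []).length = mult.length + 1 := by
        intro k hk; rw [hdp1, set2_rowlen]; exact hrowlen k hk
      have hnext1 : ∀ j, i + 1 ≤ j → j ≤ mult.length →
          pvGet2 dp1 (i+1) j = G nums mult (mult.length - j) j (i+1) := by
        intro j h1 h2
        rw [get2_of_row_eq dp dp1 (i+1) j (set2_row_ne dp i j0 (i+1) v (by omega))]
        exact hnext j h1 h2
      have hdone1 : ∀ j, j0 ≤ j → j ≤ mult.length →
          pvGet2 dp1 i j = G nums mult (mult.length - j) j i := by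
        intro j h1 h2
        by_cases hjj : j = j0
        · subst hjj
          rw [hdp1, get2_set2_self dp i j v (by omega) (by rw [hrowlen i (by omega)]; omega)]
          rw [← hv, hvdef]
        · rw [hdp1, get2_set2_col_ne dp i j0 j v hjj]
          exact hdone j (by omega) h2
      intro j hj hcase
      exact ih dp1 hdp1len hdp1rowlen (by omega) hnext1 hdone1 j hj
        (hcase.imp (fun h => h) (fun h => by omega))
    · -- break: j0 < i so r ≥ n
      have hbr : ((n - ((j0 : Int) - (i : Int)) - 1) < 0 ∨ n ≤ n - ((j0 : Int) - (i : Int)) - 1) := by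
        right
        have : (j0 : Int) < (i : Int) := by exact_mod_cast Nat.lt_of_not_le hij
        omega
      rw [if_pos hbr]
      intro j hj hcase
      have : j0 + 1 ≤ j := by
        rcases hcase with h | h
        · omega
        · exact h
      exact hdone j this hj

-- outer-loop invariant for A
theorem aOuter_spec (nums mult : List Int) (n : Int) (hn : n = (nums.length : Int))
    (hm : mult.length ≤ nums.length) (ic : Nat) (hic : ic ≤ mult.length)
    (dp : List (List Int)) (hdplen : dp.length = mult.length + 1)
    (hrowlen : ∀ k ≤ mult.length, (dp.getD k []).length = mult.length + 1)
    (hrow : ∀ j, ic ≤ j → j ≤ mult.length →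
      pvGet2 dp ic j = G nums mult (mult.length - j) j ic)
    (hzero : ∀ k, k < ic → ∀ j, j ≤ mult.length → pvGet2 dp k j = 0) :
    pvGet2 (aOuter nums mult n mult.length dp ic) 0 0 = G nums mult mult.length 0 0 := by
  induction ic generalizing dp with
  | zero =>
    have := hrow 0 (Nat.le_refl 0) (Nat.zero_le _)
    simpa using this
  | succ ii ih =>
    simp only [aOuter]
    set dp1 := aInner nums mult n ii dp mult.length with hdp1
    have hdp1len : dp1.length = mult.length + 1 := by rw [hdp1, aInner_length, hdplen]
    have hdp1rowlen : ∀ k ≤ mult.length, (dp1.getD k []).length = mult.length + 1 := by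
      intro k hk; rw [hdp1, aInner_rowlen]; exact hrowlen k hk
    have hrow1 : ∀ j, ii ≤ j → j ≤ mult.length →
        pvGet2 dp1 ii j = G nums mult (mult.length - j) j ii := by
      intro j h1 h2
      exact aInner_spec nums mult n hn hm ii (by omega) dp hdplen hrowlen mult.length
        (Nat.le_refl _)
        (fun j h1 h2 => hrow j h1 h2)
        (fun j h1 h2 => by
          have hj : j = mult.length := by omega
          subst hj
          rw [hzero ii (by omega) mult.length (Nat.le_refl _)]
          simp [G])
        j h2 (Or.inl h1)
    have hzero1 : ∀ k, k < ii → ∀ j, j ≤ mult.length → pvGet2 dp1 k j = 0 := by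
      intro k hk j hj
      rw [get2_of_row_eq dp dp1 k j (by rw [hdp1]; exact aInner_row_ne _ _ _ _ _ _ _ (by omega))]
      exact hzero k (by omega) j hj
    exact ih (by omega) dp1 hdp1len hdp1rowlen hrow1 hzero1

theorem getD_repl_row (m k : Nat) (h : k ≤ m) :
    (List.replicate (m+1) (List.replicate (m+1) (0:Int))).getD k [] = List.replicate (m+1) 0 := by
  simp [List.getD, List.getElem?_replicate, Nat.lt_succ_of_le h]

-- A's characterisation
theorem a_eq_G (nums mult : List Int) (hm : mult.length ≤ nums.length) :
    maximumScore nums mult = G nums mult mult.length 0 0 := by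
  unfold maximumScore
  apply aOuter_spec nums mult _ rfl hm mult.length (Nat.le_refl _)
  · simp
  · intro k hk
    simp [List.getD, List.getElem?_replicate, Nat.lt_succ_of_le hk]
  · intro j h1 h2
    have hj : j = mult.length := by omega
    subst hj
    unfold pvGet2
    rw [getD_repl_row _ _ (Nat.le_refl _), getD_replicate_zero]
    simp [G]
  · intro k hk j hj
    unfold pvGet2
    rw [getD_repl_row _ _ (by omega), getD_replicate_zero]

-- ===== B side =====

-- a memo is valid when every entry holds the recurrence value of its state
def ValidM (nums mult : List Int) (memo : PySem.Dict (Nat × Nat) Int) : Prop :=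
  ∀ op left v, memo.get? (op, left) = some v → v = G nums mult (mult.length - op) op left

-- fuel bound: T d iterations resolve a state at distance d from the base
def T : Nat → Nat
  | 0 => 1
  | d+1 => 2 * T d + 2

theorem T_pos (d : Nat) : 1 ≤ T d := by
  cases d
  · simp [T]
  · simp only [T]; omega

theorem T_le_pow (d : Nat) : T d + 2 ≤ 2 ^ (d + 2) := by
  induction d with
  | zero => simp [T]
  | succ d ih =>
    have h2 : (2 : Nat) ^ (d + 1 + 2) = 2 * 2 ^ (d + 2) := by ring
    simp only [T]
    omega

theorem bLoop_nil (nums mult : List Int) (n : Int) (m fuel : Nat)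
    (memo : PySem.Dict (Nat × Nat) Int) : bLoop nums mult n m fuel [] memo = memo := by
  cases fuel <;> rfl

-- resolving one state: with fuel ≥ T (m - op), the loop memoizes (op,left) and
-- returns to the rest of the stack with a valid, monotonically grown memo
theorem bResolve (nums mult : List Int) (d : Nat) :
    ∀ op left, mult.length - op = d → op ≤ mult.length →
    ∀ memo, ValidM nums mult memo →
    ∀ rest fuel, T d ≤ fuel →
    ∃ memo' fuel',
      bLoop nums mult (nums.length : Int) mult.length fuel ((op, left) :: rest) memo
        = bLoop nums mult (nums.length : Int) mult.length fuel' rest memo' ∧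
      ValidM nums mult memo' ∧
      (∀ k v, memo.get? k = some v → memo'.get? k = some v) ∧
      (memo'.get? (op, left)).isSome ∧
      fuel - T d ≤ fuel' := by
  induction d with
  | zero =>
    intro op left hd hop memo hval rest fuel hfuel
    have hopm : op = mult.length := by omega
    subst hopm
    have h1 : 1 ≤ fuel := le_trans (T_pos 0) hfuel
    obtain ⟨f, rfl⟩ : ∃ f, fuel = f + 1 := ⟨fuel - 1, by omega⟩
    by_cases hmem : (memo.get? (mult.length, left)).isSome
    · refine ⟨memo, f, ?_, hval, fun k v h => h, hmem, by simp only [T]; omega⟩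
      simp only [bLoop]
      rw [if_pos hmem]
    · refine ⟨memo.insert (mult.length, left) 0, f, ?_, ?_, ?_, ?_, by simp only [T]; omega⟩
      · simp only [bLoop]
        rw [if_neg hmem]
        simp
      · intro op' left' v hv
        rw [PySem.Dict.get?_insert] at hv
        split at hv
        · rename_i he
          obtain ⟨h1, h2⟩ := Prod.mk.injEq .. ▸ he
          cases hv
          rw [h1]
          simp [G]
        · exact hval op' left' v hv
      · intro k v h
        rw [PySem.Dict.get?_insert]
        split
        · rename_i he; rw [he] at h; rw [h] at hmem; simp at hmem
        · exact h
      · simp [PySem.Dict.get?_insert_self]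
  | succ d0 ih =>
    intro op left hd hop memo hval rest fuel hfuel
    have hopm : op < mult.length := by omega
    have hT : T (d0 + 1) = 2 * T d0 + 2 := rfl
    have h1 : 1 ≤ fuel := le_trans (T_pos _) hfuel
    obtain ⟨f, rfl⟩ : ∃ f, fuel = f + 1 := ⟨fuel - 1, by omega⟩
    by_cases hmem : (memo.get? (op, left)).isSome
    · refine ⟨memo, f, ?_, hval, fun k v h => h, hmem, by omega⟩
      simp [bLoop, hmem]
    · -- state not memoized; op < m
      have hne : ¬ op = mult.length := by omega
      -- helper facts for the compute step
      have compute : ∀ (memo₂ : PySem.Dict (Nat × Nat) Int) (a b : Int),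
          ValidM nums mult memo₂ →
          memo₂.get? (op+1, left+1) = some a →
          memo₂.get? (op+1, left) = some b →
          ValidM nums mult (memo₂.insert (op, left)
            (max (pvGetL mult op * pvGetL nums left + a)
                 (pvGetL mult op * pvGetL nums ((nums.length : Int) - 1 - ((op : Int) - (left : Int))) + b))) := by
        intro memo₂ a b hval₂ ha hb
        intro op' left' v hv
        rw [PySem.Dict.get?_insert] at hv
        split at hv
        · rename_i he
          obtain ⟨h1, h2⟩ := Prod.mk.injEq .. ▸ he
          cases hv
          rw [h1, h2]
          have hfa : mult.length - op = (mult.length - (op+1)) + 1 := by omega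
          rw [hfa]
          have ha' := hval₂ (op+1) (left+1) a ha
          have hb' := hval₂ (op+1) left b hb
          simp only [G]
          rw [ha', hb']
        · exact hval₂ op' left' v hv
      have mono_ins : ∀ (memo₂ : PySem.Dict (Nat × Nat) Int) (v : Int),
          ¬ (memo₂.get? (op, left)).isSome = true →
          ∀ k w, memo₂.get? k = some w → (memo₂.insert (op, left) v).get? k = some w := by
        intro memo₂ v hnot k w h
        rw [PySem.Dict.get?_insert]
        split
        · rename_i he; rw [he] at h; rw [h] at hnot; simp at hnot
        · exact h
      rcases hA : memo.get? (op+1, left+1) with _ | a <;> rcases hB : memo.get? (op+1, left) with _ | b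
      · -- both none: push (op+1,left) then (op+1,left+1)
        have hstep : bLoop nums mult (nums.length : Int) mult.length (f+1) ((op, left) :: rest) memo
            = bLoop nums mult (nums.length : Int) mult.length f
                ((op+1, left) :: (op+1, left+1) :: (op, left) :: rest) memo := by
          simp only [bLoop]
          rw [if_neg hmem, if_neg hne, hA, hB]
        obtain ⟨m1, f1, he1, hv1, hmono1, hk1, hf1⟩ :=
          ih (op+1) left (by omega) (by omega) memo hval ((op+1, left+1) :: (op, left) :: rest) f (by omega)
        obtain ⟨m2, f2, he2, hv2, hmono2, hk2, hf2⟩ :=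
          ih (op+1) (left+1) (by omega) (by omega) m1 hv1 ((op, left) :: rest) f1 (by omega)
        -- now both children memoized in m2
        have hk1' : (m2.get? (op+1, left)).isSome := by
          rcases ho : m1.get? (op+1, left) with _ | w
          · rw [ho] at hk1; simp at hk1
          · rw [hmono2 _ _ ho]; simp
        have hf2' : 1 ≤ f2 := by
          have := T_pos d0; omega
        obtain ⟨f3, rfl⟩ : ∃ f3, f2 = f3 + 1 := ⟨f2 - 1, by omega⟩
        by_cases hmem2 : (m2.get? (op, left)).isSome
        · refine ⟨m2, f3, ?_, hv2, fun k v h => hmono2 _ _ (hmono1 _ _ h), hmem2, by omega⟩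
          rw [hstep, he1, he2]
          simp only [bLoop]
          rw [if_pos hmem2]
        · rcases ha2 : m2.get? (op+1, left+1) with _ | a
          · rw [ha2] at hk2; simp at hk2
          · rcases hb2 : m2.get? (op+1, left) with _ | b
            · rw [hb2] at hk1'; simp at hk1'
            · refine ⟨m2.insert (op, left) _, f3, ?_, compute m2 a b hv2 ha2 hb2, ?_, ?_, by omega⟩
              · rw [hstep, he1, he2]
                simp only [bLoop]
                rw [if_neg hmem2, if_neg hne, ha2, hb2]
              · intro k v h
                exact mono_ins m2 _ hmem2 _ _ (hmono2 _ _ (hmono1 _ _ h))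
              · simp [PySem.Dict.get?_insert_self]
      · -- a none, b some: push (op+1,left+1)
        have hstep : bLoop nums mult (nums.length : Int) mult.length (f+1) ((op, left) :: rest) memo
            = bLoop nums mult (nums.length : Int) mult.length f
                ((op+1, left+1) :: (op, left) :: rest) memo := by
          simp only [bLoop]
          rw [if_neg hmem, if_neg hne, hA, hB]
        obtain ⟨m1, f1, he1, hv1, hmono1, hk1, hf1⟩ :=
          ih (op+1) (left+1) (by omega) (by omega) memo hval ((op, left) :: rest) f (by omega)
        have hf1' : 1 ≤ f1 := by have := T_pos d0; omega
        obtain ⟨f2, rfl⟩ : ∃ f2, f1 = f2 + 1 := ⟨f1 - 1, by omega⟩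
        by_cases hmem2 : (m1.get? (op, left)).isSome
        · refine ⟨m1, f2, ?_, hv1, fun k v h => hmono1 _ _ h, hmem2, by omega⟩
          rw [hstep, he1]
          simp only [bLoop]
          rw [if_pos hmem2]
        · rcases ha2 : m1.get? (op+1, left+1) with _ | a
          · rw [ha2] at hk1; simp at hk1
          · have hb2 : m1.get? (op+1, left) = some b := hmono1 _ _ hB
            refine ⟨m1.insert (op, left) _, f2, ?_, compute m1 a b hv1 ha2 hb2, ?_, ?_, by omega⟩
            · rw [hstep, he1]
              simp only [bLoop]
              rw [if_neg hmem2, if_neg hne, ha2, hb2]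
            · intro k v h
              exact mono_ins m1 _ hmem2 _ _ (hmono1 _ _ h)
            · simp [PySem.Dict.get?_insert_self]
      · -- a some, b none: push (op+1,left)
        have hstep : bLoop nums mult (nums.length : Int) mult.length (f+1) ((op, left) :: rest) memo
            = bLoop nums mult (nums.length : Int) mult.length f
                ((op+1, left) :: (op, left) :: rest) memo := by
          simp only [bLoop]
          rw [if_neg hmem, if_neg hne, hA, hB]
        obtain ⟨m1, f1, he1, hv1, hmono1, hk1, hf1⟩ :=
          ih (op+1) left (by omega) (by omega) memo hval ((op, left) :: rest) f (by omega)
        have hf1' : 1 ≤ f1 := by have := T_pos d0; omega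
        obtain ⟨f2, rfl⟩ : ∃ f2, f1 = f2 + 1 := ⟨f1 - 1, by omega⟩
        by_cases hmem2 : (m1.get? (op, left)).isSome
        · refine ⟨m1, f2, ?_, hv1, fun k v h => hmono1 _ _ h, hmem2, by omega⟩
          rw [hstep, he1]
          simp only [bLoop]
          rw [if_pos hmem2]
        · rcases hb2 : m1.get? (op+1, left) with _ | b
          · rw [hb2] at hk1; simp at hk1
          · have ha2 : m1.get? (op+1, left+1) = some a := hmono1 _ _ hA
            refine ⟨m1.insert (op, left) _, f2, ?_, compute m1 a b hv1 ha2 hb2, ?_, ?_, by omega⟩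
            · rw [hstep, he1]
              simp only [bLoop]
              rw [if_neg hmem2, if_neg hne, ha2, hb2]
            · intro k v h
              exact mono_ins m1 _ hmem2 _ _ (hmono1 _ _ h)
            · simp [PySem.Dict.get?_insert_self]
      · -- both some: compute directly
        refine ⟨memo.insert (op, left) _, f, ?_, compute memo a b hval hA hB, ?_, ?_, by omega⟩
        · simp only [bLoop]
          rw [if_neg hmem, if_neg hne, hA, hB]
        · intro k v h
          exact mono_ins memo _ hmem _ _ h
        · simp [PySem.Dict.get?_insert_self]

-- B's characterisation (unconditional)
theorem alt_eq_G (nums mult : List Int) :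
    maximumScore_alt nums mult = G nums mult mult.length 0 0 := by
  show (bLoop nums mult (nums.length : Int) mult.length (2 ^ (mult.length + 2)) [(0, 0)]
      PySem.Dict.empty).getD (0, 0) 0 = G nums mult mult.length 0 0
  obtain ⟨memo', fuel', heq, hval, _, hsome, _⟩ :=
    bResolve nums mult (mult.length) 0 0 (by omega) (by omega)
      PySem.Dict.empty (fun op left v hv => by simp [PySem.Dict.get?_empty] at hv)
      [] (2 ^ (mult.length + 2)) (by have := T_le_pow mult.length; omega)
  rw [heq, bLoop_nil]
  rcases hv : memo'.get? (0, 0) with _ | v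
  · rw [hv] at hsome; simp at hsome
  · rw [PySem.Dict.getD_eq_get?_getD, hv]
    have := hval 0 0 v hv
    simpa using this

-- ===== VERDICT (by name: the statement is the Claim_ definition above) =====
theorem maximumScore_spec : Claim_equal_maximumScore := by
  intro nums multipliers _ hpre
  unfold Spec_maximumScore
  rw [a_eq_G nums multipliers hpre, alt_eq_G]
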